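-- pv_equiv track=rewrite | github.com/Tamir-K/Advent-of-Code-2025 | day12_part1.py | get_all_rotations
-- ===== SOURCE A (Python) =====
-- def rotate_point(point):
--     """Rotate a point 90 degrees clockwise"""
--     x, y = point
--     return y, -x
--
-- def get_all_rotations(points):
--     """Generate all four rotations of the given points using yield"""
--     current_rotation = points
--
--     for _ in range(4):
--         yield current_rotation
--         current_rotation = [rotate_point(point) for point in current_rotation]
--         min_x = min(x for x, _ in current_rotation)
--         min_y = min(y for _, y in current_rotation)
--         current_rotation = [(x - min_x, y - min_y) for x, y in current_rotation]
-- ===== SOURCE B (Python) =====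
-- def _rot_k(p, k):
--     """Rotate a point by k*90 degrees clockwise, directly."""
--     x, y = p
--     if k == 1:
--         return (y, -x)
--     if k == 2:
--         return (-x, -y)
--     return (-y, x)
--
-- def get_all_rotations(points):
--     """Yield the original points, then each further rotation computed directly
--     from the original points (rotate k times, normalize once)."""
--     yield points
--     for k in (1, 2, 3):
--         r = [_rot_k(p, k) for p in points]
--         min_x = min(x for x, _ in r)
--         min_y = min(y for _, y in r)
--         yield [(x - min_x, y - min_y) for x, y in r]
-- ===== Notes on version B (the rewrite author's own statement) =====
-- stated objective: alternative
-- what changed: B computes each of the three rotations directly from the original points (rotate k times, normalize once) instead of A's step-by-step accumulator that rotates and normalizes the previous rotation; valid because rotation is linear and normalization is a translation.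
import Mathlib
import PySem

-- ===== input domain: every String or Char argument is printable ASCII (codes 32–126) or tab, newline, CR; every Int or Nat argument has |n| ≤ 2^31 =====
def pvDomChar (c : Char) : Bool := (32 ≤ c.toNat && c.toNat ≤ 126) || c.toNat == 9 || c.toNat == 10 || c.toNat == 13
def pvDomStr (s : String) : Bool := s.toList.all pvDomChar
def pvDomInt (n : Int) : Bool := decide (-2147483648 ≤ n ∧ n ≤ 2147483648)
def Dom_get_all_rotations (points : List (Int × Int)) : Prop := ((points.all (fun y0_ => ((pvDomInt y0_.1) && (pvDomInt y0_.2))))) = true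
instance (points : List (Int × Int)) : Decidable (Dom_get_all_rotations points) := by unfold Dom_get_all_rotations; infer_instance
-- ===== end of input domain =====

-- B computes each rotation directly from the original points (rotate k times, normalize once)
-- instead of A's step-by-step rotate-and-normalize accumulator; same values (rotation is linear,
-- normalization is a translation). Equality is about the list of yielded values of the generators.

-- ===== PORT A =====
-- rotate_point
def rotate_point (p : Int × Int) : Int × Int := (p.2, -p.1)

-- one iteration of A's loop body after the yield: rotate every point, then normalize by the mins.
-- Python's min(...) raises on an empty sequence; Pre_ excludes points = [], the `.getD 0` is unreachable inside Pre_.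
def stepA (cur : List (Int × Int)) : List (Int × Int) :=
  let r := cur.map rotate_point
  let min_x := (PySem.List.min? (r.map Prod.fst) (fun x => x)).getD 0
  let min_y := (PySem.List.min? (r.map Prod.snd) (fun y => y)).getD 0
  r.map (fun p => (p.1 - min_x, p.2 - min_y))

-- the generator's four yields: fold over range(4) threading (yielded-so-far, current_rotation)
def get_all_rotations (points : List (Int × Int)) : List (List (Int × Int)) :=
  ((PySem.List.pyRange 0 4 1).foldl
    (fun (st : List (List (Int × Int)) × List (Int × Int)) _ =>
      (st.1 ++ [st.2], stepA st.2))
    ([], points)).1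

-- ===== PORT B =====
def rot_k (p : Int × Int) (k : Int) : Int × Int :=
  if k = 1 then (p.2, -p.1)
  else if k = 2 then (-p.1, -p.2)
  else (-p.2, p.1)

-- body of B's k-loop (rotate k times directly, normalize once); `.getD 0` unreachable inside Pre_.
def yieldB (points : List (Int × Int)) (k : Int) : List (Int × Int) :=
  let r := points.map (fun p => rot_k p k)
  let min_x := (PySem.List.min? (r.map Prod.fst) (fun x => x)).getD 0
  let min_y := (PySem.List.min? (r.map Prod.snd) (fun y => y)).getD 0
  r.map (fun p => (p.1 - min_x, p.2 - min_y))

def get_all_rotations_alt (points : List (Int × Int)) : List (List (Int × Int)) :=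
  points :: ([1, 2, 3] : List Int).map (yieldB points)

-- ===== PRECONDITION & SPEC =====
-- Pre_ excludes only the empty list, on which both Pythons raise ValueError (min of empty sequence).
def Pre_get_all_rotations (points : List (Int × Int)) : Prop := points ≠ []
instance (points : List (Int × Int)) : Decidable (Pre_get_all_rotations points) := by unfold Pre_get_all_rotations; infer_instance
def pvWitness_get_all_rotations : (List (Int × Int)) := [(1, 2), (3, -4)]

def Spec_get_all_rotations (points : List (Int × Int)) (out : List (List (Int × Int))) : Prop := out = get_all_rotations_alt points
instance (points : List (Int × Int)) (out : List (List (Int × Int))) : Decidable (Spec_get_all_rotations points out) := by unfold Spec_get_all_rotations; infer_instance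

-- ===== CLAIM (what is proved, stated in full; the proofs are below) =====
def Claim_equal_get_all_rotations : Prop := ∀ (points : List (Int × Int)), Dom_get_all_rotations points → Pre_get_all_rotations points → Spec_get_all_rotations points (get_all_rotations points)

-- ===== LEMMAS AND PROOFS =====

theorem foldl_min_sub (l : List Int) (x a : Int) :
    (l.map (fun v => v - a)).foldl min (x - a) = l.foldl min x - a := by
  induction l generalizing x with
  | nil => simp
  | cons h t ih => simpa [min_sub_sub_right] using ih (min x h)

theorem min?_map_sub (l : List Int) (a : Int) :
    PySem.List.min? (l.map (fun v => v - a)) (fun x => x)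
      = (PySem.List.min? l (fun x => x)).map (fun v => v - a) := by
  cases l with
  | nil => simp [PySem.List.min?]
  | cons h t =>
    simp [PySem.List.min?_id_cons, foldl_min_sub]

-- the normalization shared by stepA and yieldB
def normMins (r : List (Int × Int)) : List (Int × Int) :=
  let min_x := (PySem.List.min? (r.map Prod.fst) (fun x => x)).getD 0
  let min_y := (PySem.List.min? (r.map Prod.snd) (fun y => y)).getD 0
  r.map (fun p => (p.1 - min_x, p.2 - min_y))

theorem stepA_eq (cur : List (Int × Int)) : stepA cur = normMins (cur.map rotate_point) := rfl

theorem yieldB_eq (points : List (Int × Int)) (k : Int) :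
    yieldB points k = normMins (points.map (fun p => rot_k p k)) := rfl

-- normalizing a uniformly translated list gives the same result (even on [])
theorem normMins_translate (r : List (Int × Int)) (a b : Int) :
    normMins (r.map (fun p => (p.1 - a, p.2 - b))) = normMins r := by
  cases r with
  | nil => simp [normMins]
  | cons h t =>
    show normMins ((h :: t).map (fun p => (p.1 - a, p.2 - b))) = normMins (h :: t)
    unfold normMins
    have hx : ((h :: t).map (fun p => (p.1 - a, p.2 - b))).map Prod.fst
        = ((h :: t).map Prod.fst).map (fun v => v - a) := by
      simp [List.map_map]
    have hy : ((h :: t).map (fun p => (p.1 - a, p.2 - b))).map Prod.snd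
        = ((h :: t).map Prod.snd).map (fun v => v - b) := by
      simp [List.map_map]
    rw [hx, hy, min?_map_sub, min?_map_sub]
    cases hmx : PySem.List.min? ((h :: t).map Prod.fst) (fun x => x) with
    | none => simp [PySem.List.min?_id_cons] at hmx
    | some mx =>
      cases hmy : PySem.List.min? ((h :: t).map Prod.snd) (fun y => y) with
      | none => simp [PySem.List.min?_id_cons] at hmy
      | some my =>
        simp only [Option.map_some, Option.getD_some, List.map_map]
        apply List.map_congr_left
        intro p _
        refine Prod.ext ?_ ?_ <;> dsimp [Function.comp] <;> ring

-- rotating a translated list = translating the rotated list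
theorem map_rot_translate (r : List (Int × Int)) (a b : Int) :
    (r.map (fun p => (p.1 - a, p.2 - b))).map rotate_point
      = (r.map rotate_point).map (fun p => (p.1 - b, p.2 - (-a))) := by
  simp only [List.map_map]
  apply List.map_congr_left
  intro p _
  refine Prod.ext ?_ ?_ <;> dsimp [rotate_point, Function.comp] <;> ring

theorem stepA_normMins (r : List (Int × Int)) :
    stepA (normMins r) = normMins ((r.map rotate_point)) := by
  rw [stepA_eq]
  show normMins ((normMins r).map rotate_point) = normMins (r.map rotate_point)
  unfold normMins
  rw [map_rot_translate, ← normMins, ← normMins, normMins_translate]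

theorem get_all_rotations_spec : Claim_equal_get_all_rotations := by
  intro points _ _
  show get_all_rotations points = get_all_rotations_alt points
  have h1 : yieldB points 1 = stepA points := by
    rw [yieldB_eq, stepA_eq]
    congr 1
  have h2 : yieldB points 2 = stepA (stepA points) := by
    rw [stepA_eq points, stepA_normMins, yieldB_eq]
    congr 1
    simp only [List.map_map]
    apply List.map_congr_left; intro p _
    simp [rot_k, rotate_point, Function.comp]
  have h3 : yieldB points 3 = stepA (stepA (stepA points)) := by
    rw [stepA_eq points, stepA_normMins, stepA_normMins, yieldB_eq]
    congr 1
    simp only [List.map_map]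
    apply List.map_congr_left; intro p _
    simp [rot_k, rotate_point, Function.comp]
  simp [get_all_rotations, get_all_rotations_alt, PySem.List.pyRange, List.range_succ, h1, h2, h3]
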